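-- pv_equiv track=rewrite | github.com/HoloNirvana/Game-BLACKJACK | main.py | checkcards
-- ===== SOURCE A (Python) =====
-- def checkcards(hand):
--
--     ### Players score
--     score = sum(hand)
--     for card in hand:
--         if (score > 21) and (11 in hand):
--             score -= 10
--             hand.remove(11)
--             hand.append(1)
--     return (score)
-- ===== SOURCE B (Python) =====
-- def checkcards(hand):
--     ### Players score
--     score = sum(hand)
--     aces = hand.count(11)
--     # number of aces that must be downgraded: ceil((score-21)/10), clamped to [0, aces]
--     n = min(aces, max(0, -(-(score - 21) // 10)))
--     for _ in range(n):
--         hand.remove(11)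
--         hand.append(1)
--     return score - 10 * n
-- ===== Notes on version B (the rewrite author's own statement) =====
-- stated objective: alternative
-- what changed: Replaces the len(hand)-step interleaved scan (test-and-convert once per original card) by a closed-form count: n = min(aces, ceil((score-21)/10)) computed arithmetically, then one mutation pass of exactly n remove/append steps and the result returned as score - 10*n.
import Mathlib
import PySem

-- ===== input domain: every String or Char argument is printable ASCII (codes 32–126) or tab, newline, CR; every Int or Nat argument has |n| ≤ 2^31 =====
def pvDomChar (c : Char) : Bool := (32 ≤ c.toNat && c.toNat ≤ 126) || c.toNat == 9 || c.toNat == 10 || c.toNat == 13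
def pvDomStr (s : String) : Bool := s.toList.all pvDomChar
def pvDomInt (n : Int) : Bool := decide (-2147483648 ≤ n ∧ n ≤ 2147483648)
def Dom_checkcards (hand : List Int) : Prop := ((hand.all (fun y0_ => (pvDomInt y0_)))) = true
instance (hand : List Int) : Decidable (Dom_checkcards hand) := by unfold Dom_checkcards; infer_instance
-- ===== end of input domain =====

-- B replaces A's per-card scan by a closed-form conversion count; both Pythons mutate `hand`
-- identically (aces 11 removed, 1s appended) — the equivalence proved here is about the RETURN value.

-- ===== PORT A =====
-- Python's `for card in hand` runs exactly len(hand) iterations: remove(11)+append(1) keeps the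
-- length constant, and `card` is never used; so the loop is fueled by the original length.
def checkcardsLoopA : Nat → List Int → Int → Int
  | 0, _, score => score
  | f + 1, h, score =>
    if score > 21 ∧ (11 : Int) ∈ h then
      checkcardsLoopA f (h.erase 11 ++ [1]) (score - 10)   -- hand.remove(11); hand.append(1)
    else
      checkcardsLoopA f h score

def checkcards (hand : List Int) : Int :=
  checkcardsLoopA hand.length hand hand.sum

-- ===== PORT B =====
def checkcards_alt (hand : List Int) : Int :=
  let score := hand.sum
  let aces : Int := PySem.List.count hand 11
  let n := min aces (max 0 (-(PySem.Int.floordiv (-(score - 21)) 10)))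
  -- the mutation pass (n removes/appends) does not affect the returned value
  score - 10 * n

-- ===== PRECONDITION & SPEC =====
def Spec_checkcards (hand : List Int) (out : Int) : Prop := out = checkcards_alt hand
instance (hand : List Int) (out : Int) : Decidable (Spec_checkcards hand out) := by unfold Spec_checkcards; infer_instance

-- ===== CLAIM (what is proved, stated in full; the proofs are below) =====
def Claim_equal_checkcards : Prop := ∀ (hand : List Int), Dom_checkcards hand → Spec_checkcards hand (checkcards hand)

-- ===== LEMMAS AND PROOFS =====

lemma loopA_of_le (f : Nat) (h : List Int) (s : Int) (hs : s ≤ 21) :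
    checkcardsLoopA f h s = s := by
  induction f with
  | zero => rfl
  | succ f ih =>
    rw [checkcardsLoopA, if_neg (fun hc => absurd hc.1 (by omega))]
    exact ih

lemma loopA_eq (f : Nat) (h : List Int) (s : Int) (hf : h.count 11 ≤ f) :
    checkcardsLoopA f h s
      = s - 10 * min ((h.count 11 : Int)) (max 0 ((s - 12) / 10)) := by
  induction f generalizing h s with
  | zero =>
    have h0 : h.count 11 = 0 := Nat.le_zero.mp hf
    rw [checkcardsLoopA, h0]
    push_cast
    omega
  | succ f ih =>
    by_cases hc : s > 21 ∧ (11 : Int) ∈ h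
    · rw [checkcardsLoopA, if_pos hc]
      have hpos : 0 < h.count 11 := List.count_pos_iff.mpr hc.2
      have hcount : (h.erase 11 ++ [1]).count 11 = h.count 11 - 1 := by
        rw [List.count_append, List.count_erase_self]
        simp
      rw [ih _ _ (by omega)]
      rw [hcount]
      have hs21 := hc.1
      have hle : (1:Nat) ≤ h.count 11 := hpos
      push_cast [hcount, Nat.cast_sub hle]
      omega
    · rw [checkcardsLoopA, if_neg hc]
      by_cases hs : s ≤ 21
      · rw [loopA_of_le _ _ _ hs]
        have : (s - 12) / 10 ≤ 0 := by omega
        have hcn : (0:Int) ≤ (h.count 11 : Int) := by positivity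
        omega
      · have hmem : (11 : Int) ∉ h := fun hm => hc ⟨by omega, hm⟩
        have h0 : h.count 11 = 0 := List.count_eq_zero.mpr hmem
        rw [ih _ _ (by omega), h0]

-- ===== VERDICT (by name: the statement is the Claim_ definition above) =====
theorem checkcards_spec : Claim_equal_checkcards := by
  intro hand _
  unfold Spec_checkcards checkcards checkcards_alt
  rw [loopA_eq _ _ _ (List.count_le_length)]
  rw [PySem.List.count_eq]
  simp only [PySem.Int.floordiv_eq_ediv_of_pos (b := 10) (by omega)]
  have hcn : (0:Int) ≤ (hand.count 11 : Int) := by positivity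
  omega
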